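-- pv_equiv track=rewrite | github.com/VamsiImmanneni/finalProjectSWEGPT | gt.py | function_34
-- ===== SOURCE A (Python) =====
-- def function_34(A, B):
--     """Subtract matrix B from A with a column offset in B."""
--     n = len(A)
--     result = []
--     for i in range(n):
--         row = []
--         for j in range(n):
--             offset_j = (j + 1) % n
--             row.append(A[i][j] - B[i][offset_j])
--         result.append(row)
--     return result
-- ===== SOURCE B (Python) =====
-- def function_34(A, B):
--     """Subtract matrix B from A with a column offset in B."""
--     n = len(A)
--     acols = [list(c) for c in zip(*(row[:n] for row in A), strict=True)]
--     bcols = [list(c) for c in zip(*(row[:n] for row in B[:n]), strict=True)]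
--     bcols = bcols[1:] + bcols[:1]
--     rescols = [[a - b for a, b in zip(ac, bc, strict=True)]
--                for ac, bc in zip(acols, bcols, strict=True)]
--     return [list(r) for r in zip(*rescols, strict=True)]
-- ===== Notes on version B (the rewrite author's own statement) =====
-- stated objective: alternative
-- what changed: B works column-major: it transposes A and the relevant n-by-n block of B with zip(*...), rotates the LIST OF COLUMNS of B by one, subtracts whole columns pairwise, and transposes the column list back into rows, instead of A's row-major nested loops with a per-element (j+1)%n index.
import Mathlib
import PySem

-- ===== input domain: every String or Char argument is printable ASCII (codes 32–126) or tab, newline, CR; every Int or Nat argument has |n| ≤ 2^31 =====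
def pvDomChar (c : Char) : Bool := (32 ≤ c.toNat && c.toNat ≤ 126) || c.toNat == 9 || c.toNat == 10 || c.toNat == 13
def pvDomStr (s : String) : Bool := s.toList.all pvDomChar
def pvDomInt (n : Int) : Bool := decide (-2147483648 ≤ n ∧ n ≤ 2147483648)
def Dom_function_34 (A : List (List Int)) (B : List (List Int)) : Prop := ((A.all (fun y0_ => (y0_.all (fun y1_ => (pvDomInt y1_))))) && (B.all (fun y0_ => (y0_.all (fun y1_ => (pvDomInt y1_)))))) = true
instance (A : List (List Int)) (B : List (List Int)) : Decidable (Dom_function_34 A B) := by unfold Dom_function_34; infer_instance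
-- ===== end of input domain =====

-- B is column-major: it transposes (zip(*...)) A and the used block of B, rotates B's
-- list of columns by one, subtracts whole columns, and transposes back; alternative
-- decomposition, same cost.

-- ===== PORT A =====
-- literal port of A: nested index loops, appending one element / one row at a time
def function_34 (A : List (List Int)) (B : List (List Int)) : List (List Int) :=
  let n : Int := A.length
  (PySem.List.pyRange 0 n 1).foldl (fun result i =>
    result ++ [(PySem.List.pyRange 0 n 1).foldl (fun row j =>
      row ++ [PySem.List.pyGetD (PySem.List.pyGetD A i []) j 0
              - PySem.List.pyGetD (PySem.List.pyGetD B i []) (PySem.Int.mod (j + 1) n) 0]) []]) []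

-- ===== PORT B =====
-- port of Python's zip(*rows, strict=True): fuel = first row's length (= every row's length
-- on the strict path); the isEmpty test stops at the common end)
def pyZipStarAux : Nat → List (List Int) → List (List Int)
  | 0, _ => []
  | _, [] => []
  | Nat.succ k, rows =>
      if rows.any (fun r => r.isEmpty) then []
      else (rows.map (fun r => r.headD 0)) :: pyZipStarAux k (rows.map (fun r => r.tail))

-- strict=True: all rows must have equal length, else Python raises ValueError;
-- the [] on the else branch is a dummy (those inputs are outside Pre_function_34)
def pyZipStar (rows : List (List Int)) : List (List Int) :=
  if rows.all (fun r => r.length = (rows.headD []).length) then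
    pyZipStarAux (rows.headD []).length rows
  else []

def function_34_alt (A : List (List Int)) (B : List (List Int)) : List (List Int) :=
  let n : Int := A.length
  let acols := pyZipStar (A.map (fun row => PySem.List.slice row none (some n)))
  let bcols := pyZipStar ((PySem.List.slice B none (some n)).map
    (fun row => PySem.List.slice row none (some n)))
  let bcols2 := PySem.List.slice bcols (some 1) none ++ PySem.List.slice bcols none (some 1)
  let rescols :=
    if acols.length = bcols2.length then
      List.zipWith (fun ac bc =>
        if ac.length = bc.length then List.zipWith (fun a b => a - b) ac bc else []) acols bcols2
    else []
  pyZipStar rescols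

-- ===== PRECONDITION & SPEC =====
-- exactly the inputs on which A returns: B has at least len(A) rows and every row of A,
-- and every used row of B, has at least len(A) entries (otherwise A raises IndexError)
def Pre_function_34 (A : List (List Int)) (B : List (List Int)) : Prop :=
  A.length ≤ B.length ∧ (∀ r ∈ A, A.length ≤ r.length) ∧
    (∀ r ∈ B.take A.length, A.length ≤ r.length)
instance (A : List (List Int)) (B : List (List Int)) : Decidable (Pre_function_34 A B) := by
  unfold Pre_function_34; infer_instance

def pvWitness_function_34 : List (List Int) × List (List Int) :=
  ([[1, 2], [3, 4]], [[5, 6], [7, 8]])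

def Spec_function_34 (A : List (List Int)) (B : List (List Int)) (out : List (List Int)) : Prop := out = function_34_alt A B
instance (A : List (List Int)) (B : List (List Int)) (out : List (List Int)) : Decidable (Spec_function_34 A B out) := by unfold Spec_function_34; infer_instance

-- ===== CLAIM (what is proved, stated in full; the proofs are below) =====
def Claim_equal_function_34 : Prop := ∀ (A : List (List Int)) (B : List (List Int)), Dom_function_34 A B → Pre_function_34 A B → Spec_function_34 A B (function_34 A B)

-- ===== LEMMAS AND PROOFS =====

-- A's side rewritten to a canonical map-over-range form
theorem function_34_canon (A B : List (List Int)) :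
    function_34 A B =
      (List.range A.length).map (fun i => (List.range A.length).map (fun j =>
        (A.getD i []).getD j 0 - (B.getD i []).getD ((j + 1) % A.length) 0)) := by
  unfold function_34
  simp only [PySem.List.foldl_append_singleton_eq_map, PySem.List.pyRange_one, Int.sub_zero,
    Int.toNat_natCast, List.map_map]
  refine List.map_congr_left (fun i hi => ?_)
  refine List.map_congr_left (fun j hj => ?_)
  have hn : (0 : Int) < (A.length : Int) := by
    simp only [List.mem_range] at hj; omega
  simp only [Function.comp, zero_add]
  have hm : PySem.Int.mod ((j : Int) + 1) (A.length : Int) = (((j + 1) % A.length : Nat) : Int) := by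
    rw [show ((j : Int) + 1) = ((j + 1 : Nat) : Int) by push_cast; ring]
    exact PySem.Int.mod_natCast _ _
  rw [hm]
  simp only [PySem.List.pyGetD_natCast]

-- every row nonempty: headD/tail access = positional access
theorem headD_eq_getD0 (x : List Int) (h : x ≠ []) : x.headD 0 = x.getD 0 0 := by
  cases x with
  | nil => exact absurd rfl h
  | cons y ys => simp [List.getD]

theorem tail_getD_eq (x : List Int) (j : Nat) (h : x ≠ []) : x.tail.getD j 0 = x.getD (j + 1) 0 := by
  cases x with
  | nil => exact absurd rfl h
  | cons y ys => simp [List.getD]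

-- the transpose helper on a rectangular (every row length = c) nonempty row list
theorem pyZipStarAux_rect (c : Nat) :
    ∀ rows : List (List Int), rows ≠ [] → (∀ r ∈ rows, r.length = c) →
      pyZipStarAux c rows = (List.range c).map (fun j => rows.map (fun r => r.getD j 0)) := by
  induction c with
  | zero => intro rows _ _; cases rows with
    | nil => simp [pyZipStarAux]
    | cons r rs => simp [pyZipStarAux]
  | succ k ih =>
    intro rows hne hlen
    have hner : ∀ x ∈ rows, x ≠ [] := by
      intro x hx h
      have := hlen x hx
      rw [h] at this; simp at this
    cases rows with
    | nil => exact absurd rfl hne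
    | cons r rs =>
      have hnoempty : ((r :: rs).any (fun r => r.isEmpty)) = false := by
        simp only [List.any_eq_false]
        intro x hx
        simp only [List.isEmpty_iff]
        exact hner x hx
      rw [show pyZipStarAux (k+1) (r :: rs) = if ((r :: rs).any (fun r => r.isEmpty)) then [] else ((r :: rs).map (fun r => r.headD 0)) :: pyZipStarAux k ((r :: rs).map (fun r => r.tail)) from rfl, if_neg (by simp [hnoempty])]
      have hne2 : (r :: rs) ≠ [] := by simp
      generalize hrows : (r :: rs) = rows at hlen hner hne2 ⊢
      have htl : ∀ t ∈ rows.map (fun r => r.tail), t.length = k := by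
        intro t ht
        simp only [List.mem_map] at ht
        obtain ⟨x, hx, rfl⟩ := ht
        have := hlen x hx
        simp [List.length_tail, this]
      rw [ih (rows.map (fun r => r.tail)) (by simpa using hne2) htl]
      rw [List.range_succ_eq_map, List.map_cons, List.map_map]
      congr 1
      · exact List.map_congr_left fun x hx => headD_eq_getD0 x (hner x hx)
      · refine List.map_congr_left fun j hj => ?_
        simp only [Function.comp_def, List.map_map, Nat.succ_eq_add_one]
        exact List.map_congr_left fun x hx => tail_getD_eq x j (hner x hx)

theorem pyZipStar_rect (c : Nat) (rows : List (List Int)) (hne : rows ≠ [])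
    (hlen : ∀ r ∈ rows, r.length = c) :
    pyZipStar rows = (List.range c).map (fun j => rows.map (fun r => r.getD j 0)) := by
  have hhead : (rows.headD []).length = c := by
    cases rows with
    | nil => exact absurd rfl hne
    | cons r rs => exact hlen r (by simp)
  unfold pyZipStar
  rw [if_pos (by simp only [List.all_eq_true, decide_eq_true_eq]; intro r hr; rw [hhead]; exact hlen r hr)]
  rw [hhead]
  exact pyZipStarAux_rect c rows hne hlen

theorem function_34_spec' (A B : List (List Int)) (h : Pre_function_34 A B) :
    function_34 A B = function_34_alt A B := by
  obtain ⟨hB, hA, hBr⟩ := h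
  rw [function_34_canon]
  unfold function_34_alt
  by_cases hn0 : A.length = 0
  · have hAnil : A = [] := List.length_eq_zero_iff.mp hn0
    subst hAnil
    simp [pyZipStar, pyZipStarAux, PySem.List.slice_to]
  have hn : 0 < A.length := Nat.pos_of_ne_zero hn0
  -- acols
  have hsliceA : ∀ row : List Int, PySem.List.slice row none (some (A.length : Int)) = row.take A.length :=
    fun row => PySem.List.slice_to_natCast ..
  have hsliceB0 : PySem.List.slice B none (some (A.length : Int)) = B.take A.length :=
    PySem.List.slice_to_natCast ..
  simp only [hsliceA, hsliceB0]
  have hacols : pyZipStar (A.map (fun row => row.take A.length)) =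
      (List.range A.length).map (fun j => A.map (fun row => (row.take A.length).getD j 0)) := by
    rw [pyZipStar_rect A.length]
    · simp [List.map_map, Function.comp_def]
    · simp [← List.length_eq_zero_iff]; omega
    · intro r hr
      simp only [List.mem_map] at hr
      obtain ⟨row, hrow, rfl⟩ := hr
      have := hA row hrow
      simp [List.length_take]; omega
  have hbcols : pyZipStar ((B.take A.length).map (fun row => row.take A.length)) =
      (List.range A.length).map (fun j => (B.take A.length).map (fun row => (row.take A.length).getD j 0)) := by
    rw [pyZipStar_rect A.length]
    · simp [List.map_map, Function.comp_def]
    · simp [← List.length_eq_zero_iff, List.length_take]; omega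
    · intro r hr
      simp only [List.mem_map] at hr
      obtain ⟨row, hrow, rfl⟩ := hr
      have := hBr row hrow
      simp [List.length_take]; omega
  rw [hacols, hbcols]
  have hsfrom : PySem.List.slice ((List.range A.length).map (fun j => (B.take A.length).map (fun row => (row.take A.length).getD j 0))) (some (1 : Int)) none =
      ((List.range A.length).map (fun j => (B.take A.length).map (fun row => (row.take A.length).getD j 0))).drop 1 := by
    have := PySem.List.slice_from_natCast (xs := (List.range A.length).map (fun j => (B.take A.length).map (fun row => (row.take A.length).getD j 0))) (a := 1)
    simpa using this
  have hsto : PySem.List.slice ((List.range A.length).map (fun j => (B.take A.length).map (fun row => (row.take A.length).getD j 0))) none (some (1 : Int)) =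
      ((List.range A.length).map (fun j => (B.take A.length).map (fun row => (row.take A.length).getD j 0))).take 1 := by
    have := PySem.List.slice_to_natCast (xs := (List.range A.length).map (fun j => (B.take A.length).map (fun row => (row.take A.length).getD j 0))) (b := 1)
    simpa using this
  rw [hsfrom, hsto]
  set g : Nat → List Int := fun j => (B.take A.length).map (fun row => (row.take A.length).getD j 0) with hg
  set acol : Nat → List Int := fun j => A.map (fun row => (row.take A.length).getD j 0) with hacol
  set bcols2 : List (List Int) := ((List.range A.length).map g).drop 1 ++ ((List.range A.length).map g).take 1 with hbc2
  have hlenBt : (B.take A.length).length = A.length := by simp [List.length_take]; omega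
  have hbc2len : bcols2.length = A.length := by
    simp [hbc2, List.length_drop, List.length_take]; omega
  rw [if_pos (by simp only [List.length_map, List.length_range, hbc2len] :
    ((List.range A.length).map acol).length = bcols2.length)]
  set rescols : List (List Int) := List.zipWith (fun ac bc =>
    if ac.length = bc.length then List.zipWith (fun a b => a - b) ac bc else [])
    ((List.range A.length).map acol) bcols2 with hrc
  have hbc2get : ∀ (j : Nat) (hj : j < A.length), bcols2[j]'(by omega) = g ((j + 1) % A.length) := by
    intro j hj
    by_cases hlt : j < A.length - 1
    · simp only [hbc2]
      rw [List.getElem_append_left (by simp [List.length_drop]; omega)]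
      rw [List.getElem_drop]
      simp only [List.getElem_map, List.getElem_range]
      rw [Nat.mod_eq_of_lt (by omega)]
      congr 1
      omega
    · have hj1 : j = A.length - 1 := by omega
      simp only [hbc2]
      rw [List.getElem_append_right (by simp [List.length_drop]; omega)]
      simp only [List.length_drop, List.length_map, List.length_range, List.getElem_take,
        List.getElem_map, List.getElem_range]
      have : (j + 1) % A.length = 0 := by
        rw [hj1, Nat.sub_add_cancel (by omega)]; exact Nat.mod_self _
      rw [this]
      congr 1
      omega
  have hrclen : rescols.length = A.length := by
    simp [hrc, List.length_zipWith, hbc2len]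
  have hresget : ∀ (j : Nat) (hj : j < A.length), rescols[j]'(by rw [hrclen]; exact hj) =
      List.zipWith (fun a b => a - b) (acol j) (g ((j + 1) % A.length)) := by
    intro j hj
    simp only [hrc]
    rw [List.getElem_zipWith]
    rw [hbc2get j hj]
    simp only [List.getElem_map, List.getElem_range]
    rw [if_pos]
    simp [hacol, hg]
    omega
  have hgl : ∀ j, (g j).length = A.length := by intro j; simp [hg]; omega
  have hal : ∀ j, (acol j).length = A.length := by intro j; simp [hacol]
  have hfin : pyZipStar rescols =
      (List.range A.length).map (fun i => rescols.map (fun r => r.getD i 0)) := by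
    apply pyZipStar_rect
    · simp [← List.length_eq_zero_iff, hrclen]; omega
    · intro r hr
      obtain ⟨j, hj, rfl⟩ := List.getElem_of_mem hr
      rw [hresget j (by omega)]
      simp [List.length_zipWith, hgl, hal]
  rw [hfin]
  apply List.ext_getElem
  · simp
  intro i hi hi'
  simp only [List.getElem_map, List.getElem_range]
  have hiA : i < A.length := by simpa using hi
  apply List.ext_getElem
  · simp [hrclen]
  intro j hj hj'
  simp only [List.length_map, List.length_range] at hj
  simp only [List.getElem_map, List.getElem_range]
  rw [hresget j hj]
  have hzl : (List.zipWith (fun a b => a - b) (acol j) (g ((j + 1) % A.length))).length = A.length := by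
    simp [List.length_zipWith, hgl, hal]
  have hres2 : (List.zipWith (fun a b => a - b) (acol j) (g ((j + 1) % A.length))).getD i 0 =
      (acol j)[i]'(by rw [hal]; omega) - (g ((j + 1) % A.length))[i]'(by rw [hgl]; omega) := by
    rw [List.getD_eq_getElem?_getD, List.getElem?_eq_getElem (by omega : i < (List.zipWith (fun a b => a - b) (acol j) (g ((j + 1) % A.length))).length)]
    simp [List.getElem_zipWith]
  rw [hres2]
  have hArow : A.length ≤ A[i].length := hA _ (List.getElem_mem hiA)
  have hBit : i < (B.take A.length).length := by rw [hlenBt]; exact hiA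
  have hiB : i < B.length := by omega
  have hBrow : A.length ≤ ((B.take A.length)[i]'hBit).length := hBr _ (List.getElem_mem hBit)
  have hBi : (B.take A.length)[i]'hBit = B[i]'hiB := List.getElem_take
  have hBrow' : A.length ≤ (B[i]'hiB).length := by rw [hBi] at hBrow; exact hBrow
  have hmlt : (j + 1) % A.length < A.length := Nat.mod_lt _ (by omega)
  have hleft : (acol j)[i]'(by rw [hal]; omega) = (A.getD i []).getD j 0 := by
    have hAg : A.getD i [] = A[i] := by
      rw [List.getD_eq_getElem?_getD, List.getElem?_eq_getElem hiA]; simp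
    have hjt : j < (A[i].take A.length).length := by simp [List.length_take]; omega
    have h1 : (A[i].take A.length).getD j 0 = A[i][j]'(by omega) := by
      rw [List.getD_eq_getElem?_getD, List.getElem?_eq_getElem hjt]
      simp [List.getElem_take]
    have h2 : A[i].getD j 0 = A[i][j]'(by omega) := by
      rw [List.getD_eq_getElem?_getD, List.getElem?_eq_getElem (show j < A[i].length by omega)]
      simp
    simp only [hacol, List.getElem_map, hAg, h1, h2]
  have hright : (g ((j + 1) % A.length))[i]'(by rw [hgl]; omega) = (B.getD i []).getD ((j + 1) % A.length) 0 := by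
    have hBg : B.getD i [] = B[i]'hiB := by
      rw [List.getD_eq_getElem?_getD, List.getElem?_eq_getElem hiB]; simp
    have hmt : (j + 1) % A.length < ((B[i]'hiB).take A.length).length := by
      simp [List.length_take]; omega
    have h1 : ((B[i]'hiB).take A.length).getD ((j + 1) % A.length) 0 = (B[i]'hiB)[(j + 1) % A.length]'(by omega) := by
      rw [List.getD_eq_getElem?_getD, List.getElem?_eq_getElem hmt]
      simp [List.getElem_take]
    have h2 : (B[i]'hiB).getD ((j + 1) % A.length) 0 = (B[i]'hiB)[(j + 1) % A.length]'(by omega) := by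
      rw [List.getD_eq_getElem?_getD, List.getElem?_eq_getElem (show (j + 1) % A.length < (B[i]'hiB).length by omega)]
      simp
    simp only [hg, List.getElem_map, hBg, hBi, h1, h2]
  rw [hleft, hright]

-- ===== VERDICT (by name: the statement is the Claim_ definition above) =====
theorem function_34_spec : Claim_equal_function_34 := by
  intro A B _ hPre
  unfold Spec_function_34
  exact function_34_spec' A B hPre
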